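-- pv_equiv track=rewrite | github.com/wopdevries/make-dds-dataset | make_dds_results.py | calculate_hcp
-- ===== SOURCE A (Python) =====
-- def calculate_hcp(pbn_hand):
--     hcp = 0
--     suits = pbn_hand.split('.')
--     for suit in suits:
--         for card in suit:
--             if card == 'A':
--                 hcp += 4
--             elif card == 'K':
--                 hcp += 3
--             elif card == 'Q':
--                 hcp += 2
--             elif card == 'J':
--                 hcp += 1
--     return hcp
-- ===== SOURCE B (Python) =====
-- def calculate_hcp(pbn_hand):
--     return (4 * pbn_hand.count('A') + 3 * pbn_hand.count('K')
--             + 2 * pbn_hand.count('Q') + pbn_hand.count('J'))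
-- ===== Notes on version B (the rewrite author's own statement) =====
-- stated objective: faster
-- what changed: Replaced the suit-splitting plus nested per-card branching loop by a single closed-form expression of weighted character counts over the whole string (separator and non-honor characters contribute nothing to any count).
import Mathlib
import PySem

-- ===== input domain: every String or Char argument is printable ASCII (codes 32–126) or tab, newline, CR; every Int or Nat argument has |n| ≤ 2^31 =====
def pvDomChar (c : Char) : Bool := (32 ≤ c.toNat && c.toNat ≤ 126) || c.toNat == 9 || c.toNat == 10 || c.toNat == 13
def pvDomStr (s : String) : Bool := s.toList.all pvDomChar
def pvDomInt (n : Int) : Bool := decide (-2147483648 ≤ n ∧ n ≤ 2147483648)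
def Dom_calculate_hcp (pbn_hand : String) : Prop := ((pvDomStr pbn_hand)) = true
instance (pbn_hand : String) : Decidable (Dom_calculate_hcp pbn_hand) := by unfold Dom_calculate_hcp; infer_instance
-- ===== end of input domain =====

-- B replaces A's suit-splitting and nested branching loop by one closed-form weighted-count expression (measured constant-factor speedup: counting runs in the C library instead of a Python loop).


-- ===== PORT A =====
def calculate_hcp (pbn_hand : String) : Int :=
  let hcp : Int := 0
  let suits := (PySem.Str.split? pbn_hand ".").getD []   -- sep "." ≠ "", so split? is always `some`
  suits.foldl (fun hcp suit =>
    suit.toList.foldl (fun hcp card =>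
      if card = 'A' then hcp + 4
      else if card = 'K' then hcp + 3
      else if card = 'Q' then hcp + 2
      else if card = 'J' then hcp + 1
      else hcp) hcp) hcp

-- ===== PORT B =====
def calculate_hcp_alt (pbn_hand : String) : Int :=
  4 * (PySem.Str.count pbn_hand "A" : Int) + 3 * (PySem.Str.count pbn_hand "K" : Int)
    + 2 * (PySem.Str.count pbn_hand "Q" : Int) + (PySem.Str.count pbn_hand "J" : Int)

-- ===== PRECONDITION & SPEC =====
def Spec_calculate_hcp (pbn_hand : String) (out : Int) : Prop := out = calculate_hcp_alt pbn_hand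
instance (pbn_hand : String) (out : Int) : Decidable (Spec_calculate_hcp pbn_hand out) := by unfold Spec_calculate_hcp; infer_instance

-- ===== CLAIM (what is proved, stated in full; the proofs are below) =====
def Claim_equal_calculate_hcp : Prop := ∀ (pbn_hand : String), Dom_calculate_hcp pbn_hand → Spec_calculate_hcp pbn_hand (calculate_hcp pbn_hand)

-- ===== LEMMAS AND PROOFS =====

-- Counting a single-character substring is counting that character.
theorem countGo_single (c : Char) (fuel : Nat) : ∀ (l : List Char) (acc : Nat),
    l.length ≤ fuel → PySem.Chars.count.go [c] fuel l acc = acc + l.count c := by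
  induction fuel with
  | zero =>
    intro l acc h
    have : l = [] := List.eq_nil_of_length_eq_zero (Nat.le_zero.mp h)
    subst this; simp [PySem.Chars.count.go]
  | succ fuel ih =>
    intro l acc h
    cases l with
    | nil => simp [PySem.Chars.count.go]
    | cons x t =>
      simp only [PySem.Chars.count.go]
      simp only [List.isPrefixOf, Bool.and_true, beq_iff_eq]
      by_cases hx : c = x
      · subst hx
        rw [if_pos rfl, ih _ _ (by simpa using Nat.lt_succ_iff.mp (by simpa using h))]
        simp; omega
      · rw [if_neg (by simpa using hx), ih _ _ (by simpa using Nat.lt_succ_iff.mp (by simpa using h))]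
        simp [show x ≠ c from fun hh => hx hh.symm]

theorem count_single (s : List Char) (c : Char) :
    PySem.Chars.count s [c] = s.count c := by
  simp [PySem.Chars.count, countGo_single c s.length s 0 (le_refl _)]

-- Flattening the '.'-split of a char list filters out the dots.
theorem splitOnGo_flatten (fuel : Nat) : ∀ (l cur : List Char) (acc : List (List Char)),
    l.length ≤ fuel →
    (PySem.Chars.splitOn.go ['.'] fuel l cur acc).flatten
      = acc.reverse.flatten ++ cur.reverse ++ l.filter (· ≠ '.') := by
  induction fuel with
  | zero =>
    intro l cur acc h
    have : l = [] := List.eq_nil_of_length_eq_zero (Nat.le_zero.mp h)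
    subst this; simp [PySem.Chars.splitOn.go]
  | succ fuel ih =>
    intro l cur acc h
    cases l with
    | nil => simp [PySem.Chars.splitOn.go]
    | cons x t =>
      simp only [PySem.Chars.splitOn.go]
      simp only [List.isPrefixOf, Bool.and_true, beq_iff_eq]
      by_cases hx : x = '.'
      · subst hx
        rw [if_pos rfl, ih _ _ _ (by simpa using Nat.lt_succ_iff.mp (by simpa using h))]
        simp
      · rw [if_neg (by simpa using fun hh : '.' = x => hx hh.symm),
            ih _ _ _ (by simpa using Nat.lt_succ_iff.mp (by simpa using h))]
        simp [hx]

theorem splitOn_flatten (s : List Char) :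
    (PySem.Chars.splitOn s ['.']).flatten = s.filter (· ≠ '.') := by
  simpa using splitOnGo_flatten (s.length + 1) s [] [] (by omega)

-- A's inner loop is a weighted count of the honor characters.
theorem foldl_hcp (l : List Char) : ∀ (a : Int),
    l.foldl (fun hcp card =>
      if card = 'A' then hcp + 4
      else if card = 'K' then hcp + 3
      else if card = 'Q' then hcp + 2
      else if card = 'J' then hcp + 1
      else hcp) a
    = a + 4 * (l.count 'A' : Int) + 3 * (l.count 'K' : Int)
        + 2 * (l.count 'Q' : Int) + (l.count 'J' : Int) := by
  induction l with
  | nil => intro a; simp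
  | cons x t ih =>
    intro a
    simp only [List.foldl_cons, List.count_cons, ih]
    split_ifs with h1 h2 h3 h4 <;> subst_eqs <;> simp_all <;> ring

-- ===== VERDICT (by name: the statement is the Claim_ definition above) =====
theorem calculate_hcp_spec : Claim_equal_calculate_hcp := by
  intro s _
  show calculate_hcp s = calculate_hcp_alt s
  have hsplit : PySem.Str.split? s "." =
      some ((PySem.Chars.splitOn s.toList ['.']).map String.ofList) := by
    simp [PySem.Str.split?, PySem.Chars.split?]
  rw [calculate_hcp, calculate_hcp_alt, hsplit]
  simp only [Option.getD_some, List.foldl_map, PySem.Str.count_eq]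
  simp only [String.toList_ofList]
  rw [← List.foldl_flatten, splitOn_flatten, foldl_hcp]
  rw [List.count_filter (by decide), List.count_filter (by decide),
      List.count_filter (by decide), List.count_filter (by decide)]
  simp [count_single]
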